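-- pv_equiv track=rewrite | github.com/itamar-sh/Python-Tool-Kit | extra_tools/web_scrapping/itamar_shechter_dono.py | analyze_pdf_for_party_data
-- ===== SOURCE A (Python) =====
-- def analyze_pdf_for_party_data(pdf_text: str, records: list):
--     # Compare PDF content with records to extract full "to" and "from" details
--     pdf_lines = pdf_text.splitlines()
--     for record in records:
--         instrument_number = str(record["inst_num"])
--         for line in pdf_lines:
--             if instrument_number in line:  # Match by instrument number
--                 # Update "to" and "from" fields with additional party data from the PDF
--                 record["from_party_full"] = line.split("From:")[1].split("To:")[0].strip() if "From:" in line else ""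
--                 record["to_party_full"] = line.split("To:")[1].strip() if "To:" in line else ""
--     return records
-- ===== SOURCE B (Python) =====
-- def analyze_pdf_for_party_data(pdf_text: str, records: list):
--     # Same return value as A (and same in-place mutation of the record dicts):
--     # instead of A's forward scan that re-parses and overwrites the party fields
--     # at every matching line, B searches the lines backwards with an early exit
--     # for the last matching line, and only if one exists parses it once and sets
--     # the two fields.  Records with no matching line are left untouched.
--     lines = pdf_text.splitlines()
--     for record in records:
--         needle = str(record["inst_num"])
--         hit = None
--         for line in reversed(lines):
--             if needle in line:
--                 hit = line
--                 break
--         if hit is not None: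
--             fp = hit.split("From:")[1].split("To:")[0].strip() if "From:" in hit else ""
--             tp = hit.split("To:")[1].strip() if "To:" in hit else ""
--             record["from_party_full"] = fp
--             record["to_party_full"] = tp
--     return records
-- ===== Notes on version B (the rewrite author's own statement) =====
-- stated objective: alternative
-- what changed: A's forward scan parses and overwrites the party fields at every matching line; B searches the lines backwards with an early exit for the last matching line and parses it exactly once, touching the record only when a match exists.
-- outside the precondition, e.g. on analyze_pdf_for_party_data('x', [{}]): A raises KeyError, B raises KeyError
import Mathlib
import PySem

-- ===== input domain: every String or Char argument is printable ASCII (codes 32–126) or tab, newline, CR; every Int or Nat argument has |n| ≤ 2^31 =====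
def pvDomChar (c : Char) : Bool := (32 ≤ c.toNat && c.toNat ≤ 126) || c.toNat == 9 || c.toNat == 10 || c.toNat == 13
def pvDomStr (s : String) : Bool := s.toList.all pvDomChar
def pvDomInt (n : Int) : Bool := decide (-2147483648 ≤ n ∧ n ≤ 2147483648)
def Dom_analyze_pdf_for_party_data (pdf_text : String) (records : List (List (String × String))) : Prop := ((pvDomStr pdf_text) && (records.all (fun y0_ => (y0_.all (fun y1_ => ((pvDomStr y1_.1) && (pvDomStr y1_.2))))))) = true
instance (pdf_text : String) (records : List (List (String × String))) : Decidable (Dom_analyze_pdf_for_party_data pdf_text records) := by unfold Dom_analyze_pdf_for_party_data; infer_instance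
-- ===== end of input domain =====

-- B replaces A's forward scan (parse + overwrite at every matching line) by a backwards
-- early-exit search for the last matching line, parsed once and written only on a match.
-- Both Pythons mutate the record dicts in place; the theorem is about the returned value.

-- ===== PORT A =====
-- record[k] (first match) and record[k] = v (overwrite in place, new keys append)
def pvLookup (r : List (String × String)) (k : String) : Option String :=
  (r.find? (fun p => p.1 == k)).map (·.2)

def pvSetField : List (String × String) → String → String → List (String × String)
  | [], k, v => [(k, v)]
  | p :: rest, k, v => if p.1 = k then (k, v) :: rest else p :: pvSetField rest k v

-- A's two field-parsing expressions
-- ([1] / [0] after a guarded split are total: the guard guarantees the index exists,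
--  so the .getD default is never used on admitted inputs)
def pvParseFrom (line : String) : String :=
  if PySem.Str.isIn "From:" line then
    PySem.Str.strip (PySem.List.pyGetD
      ((PySem.Str.split? (PySem.List.pyGetD ((PySem.Str.split? line "From:").getD []) 1 "") "To:").getD []) 0 "")
  else ""

def pvParseTo (line : String) : String :=
  if PySem.Str.isIn "To:" line then
    PySem.Str.strip (PySem.List.pyGetD ((PySem.Str.split? line "To:").getD []) 1 "")
  else ""

def pvSetBoth (rec : List (String × String)) (line : String) : List (String × String) :=
  pvSetField (pvSetField rec "from_party_full" (pvParseFrom line)) "to_party_full" (pvParseTo line)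

def analyze_pdf_for_party_data (pdf_text : String) (records : List (List (String × String))) : List (List (String × String)) :=
  let pdf_lines := PySem.Str.splitlines pdf_text
  records.map (fun record =>
    let instrument_number := (pvLookup record "inst_num").getD ""  -- Pre_ guarantees the key is present
    pdf_lines.foldl (fun rec line =>
      if PySem.Str.isIn instrument_number line then pvSetBoth rec line else rec) record)

-- ===== PORT B =====
-- B-side helpers (B's own decomposition: index-based overwrite, paired parse,
-- explicit recursion over the records).
-- record[k] with default "" (the default is unreachable under Pre_)
def pvFieldOf : List (String × String) → String → String
  | [], _ => ""
  | (k', v) :: rest, k => if k' = k then v else pvFieldOf rest k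

-- record[k] = v: overwrite the first occurrence in place, append a new key
def pvPutKV (r : List (String × String)) (k v : String) : List (String × String) :=
  match r.findIdx? (fun p => p.1 == k) with
  | some i => r.set i (k, v)
  | none => r ++ [(k, v)]

-- parse both party fields of the matched line at once (same guarded split/strip chains)
def pvParseLine (hit : String) : String × String :=
  let fp := if PySem.Str.isIn "From:" hit then
      PySem.Str.strip (PySem.List.pyGetD
        ((PySem.Str.split? (PySem.List.pyGetD ((PySem.Str.split? hit "From:").getD []) 1 "") "To:").getD []) 0 "")
    else ""
  let tp := if PySem.Str.isIn "To:" hit then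
      PySem.Str.strip (PySem.List.pyGetD ((PySem.Str.split? hit "To:").getD []) 1 "")
    else ""
  (fp, tp)

def pvFillRecords (lines : List String) : List (List (String × String)) → List (List (String × String))
  | [] => []
  | record :: rest =>
    let needle := pvFieldOf record "inst_num"
    let filled :=
      match lines.reverse.find? (fun line => PySem.Str.isIn needle line) with
      | none => record
      | some hit =>
        let parsed := pvParseLine hit
        pvPutKV (pvPutKV record "from_party_full" parsed.1) "to_party_full" parsed.2
    filled :: pvFillRecords lines rest

def analyze_pdf_for_party_data_alt (pdf_text : String) (records : List (List (String × String))) : List (List (String × String)) :=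
  pvFillRecords (PySem.Str.splitlines pdf_text) records

-- ===== PRECONDITION & SPEC =====
-- Pre_ excludes exactly the records without an "inst_num" key, on which A raises KeyError.
def Pre_analyze_pdf_for_party_data (_pdf_text : String) (records : List (List (String × String))) : Prop :=
  records.all (fun r => r.any (fun p => p.1 == "inst_num")) = true
instance (pdf_text : String) (records : List (List (String × String))) : Decidable (Pre_analyze_pdf_for_party_data pdf_text records) := by unfold Pre_analyze_pdf_for_party_data; infer_instance

def pvWitness_analyze_pdf_for_party_data : String × (List (List (String × String))) :=
  ("17 From: Alice To: Bob\nno match", [[("inst_num", "17")], [("inst_num", "9")]])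

def Spec_analyze_pdf_for_party_data (pdf_text : String) (records : List (List (String × String))) (out : List (List (String × String))) : Prop := out = analyze_pdf_for_party_data_alt pdf_text records
instance (pdf_text : String) (records : List (List (String × String))) (out : List (List (String × String))) : Decidable (Spec_analyze_pdf_for_party_data pdf_text records out) := by unfold Spec_analyze_pdf_for_party_data; infer_instance

-- ===== CLAIM (what is proved, stated in full; the proofs are below) =====
def Claim_equal_analyze_pdf_for_party_data : Prop := ∀ (pdf_text : String) (records : List (List (String × String))), Dom_analyze_pdf_for_party_data pdf_text records → Pre_analyze_pdf_for_party_data pdf_text records → Spec_analyze_pdf_for_party_data pdf_text records (analyze_pdf_for_party_data pdf_text records)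

-- ===== LEMMAS AND PROOFS =====

-- B's index-based overwrite is A's structural one
lemma pvPutKV_eq (r : List (String × String)) (k v : String) :
    pvPutKV r k v = pvSetField r k v := by
  induction r with
  | nil => simp [pvPutKV, pvSetField]
  | cons p rest ih =>
    by_cases h : p.1 = k
    · simp [pvPutKV, pvSetField, List.findIdx?_cons, h]
    · unfold pvPutKV at ih ⊢
      simp only [List.findIdx?_cons, beq_iff_eq, h, if_false, pvSetField]
      cases hf : rest.findIdx? (fun p => p.1 == k) with
      | none => simp [hf] at ih; simp [ih]
      | some i => simp [hf] at ih; simp [ih]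

-- B's defaulted lookup is A's
lemma pvFieldOf_eq (r : List (String × String)) (k : String) :
    pvFieldOf r k = (pvLookup r k).getD "" := by
  induction r with
  | nil => simp [pvFieldOf, pvLookup]
  | cons p rest ih =>
    by_cases h : p.1 = k
    · simp [pvFieldOf, pvLookup, h]
    · simp [pvFieldOf, pvLookup, h] at ih ⊢; exact ih

-- B's paired parse is A's two parses
lemma pvParseLine_eq (hit : String) :
    pvParseLine hit = (pvParseFrom hit, pvParseTo hit) := rfl

-- overwriting the same key twice keeps only the last value
lemma pvSetField_same (r : List (String × String)) (k v w : String) :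
    pvSetField (pvSetField r k v) k w = pvSetField r k w := by
  induction r with
  | nil => simp [pvSetField]
  | cons p rest ih =>
    by_cases h : p.1 = k
    · simp [pvSetField, h]
    · simp [pvSetField, h, ih]

-- once k is set, a later write at k lands on the same position, past any k' ≠ k write
lemma pvSetField_swap (r : List (String × String)) (k k' v u w : String) (hne : k ≠ k') :
    pvSetField (pvSetField (pvSetField r k v) k' u) k w
      = pvSetField (pvSetField r k w) k' u := by
  induction r with
  | nil => simp [pvSetField, hne]
  | cons p rest ih =>
    by_cases h : p.1 = k
    · simp [pvSetField, h, hne]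
    · by_cases h' : p.1 = k'
      · simp [pvSetField, h', Ne.symm hne, pvSetField_same]
      · simp [pvSetField, h, h', ih]

-- a second write of both fields overwrites the first completely
lemma pvSetBoth_absorb (r : List (String × String)) (l1 l2 : String) :
    pvSetBoth (pvSetBoth r l1) l2 = pvSetBoth r l2 := by
  unfold pvSetBoth
  rw [pvSetField_swap r "from_party_full" "to_party_full" (pvParseFrom l1) (pvParseTo l1)
        (pvParseFrom l2) (by decide),
      pvSetField_same]

-- A's overwriting forward fold equals the last match parsed once
lemma foldl_eq_last_match (P : String → Bool) :
    ∀ (lines : List String) (r : List (String × String)),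
      lines.foldl (fun rec line => if P line then pvSetBoth rec line else rec) r
        = match lines.reverse.find? P with
          | none => r
          | some line => pvSetBoth r line := by
  intro lines
  induction lines with
  | nil => intro r; simp
  | cons x xs ih =>
    intro r
    simp only [List.foldl_cons, List.reverse_cons, List.find?_append, ih]
    cases hfind : xs.reverse.find? P with
    | none => by_cases hx : P x <;> simp [hx]
    | some l => by_cases hx : P x <;> simp [hx, pvSetBoth_absorb]

-- A's per-record fold over each record equals B's recursion over the records
lemma pvFillRecords_eq_map (lines : List String) (rs : List (List (String × String))) :
    rs.map (fun record =>
        lines.foldl (fun rec line =>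
          if PySem.Str.isIn ((pvLookup record "inst_num").getD "") line then pvSetBoth rec line else rec) record)
      = pvFillRecords lines rs := by
  induction rs with
  | nil => simp [pvFillRecords]
  | cons record rest ih =>
    simp only [List.map_cons, pvFillRecords, List.cons.injEq]
    refine ⟨?_, ih⟩
    rw [pvFieldOf_eq, foldl_eq_last_match]
    cases lines.reverse.find?
        (fun line => PySem.Str.isIn ((pvLookup record "inst_num").getD "") line) with
    | none => rfl
    | some hit => simp [pvParseLine_eq, pvPutKV_eq, pvSetBoth]

-- ===== VERDICT (by name: the statement is the Claim_ definition above) =====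
theorem analyze_pdf_for_party_data_spec : Claim_equal_analyze_pdf_for_party_data := by
  intro pdf_text records _ _
  unfold Spec_analyze_pdf_for_party_data analyze_pdf_for_party_data analyze_pdf_for_party_data_alt
  exact pvFillRecords_eq_map (PySem.Str.splitlines pdf_text) records
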